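-- pv_equiv track=rewrite | github.com/muhammadzainrafique/aiops-multi-agent-platform | discord_bot.py | map_files_to_chapters
-- ===== SOURCE A (Python) =====
-- CHAPTER_MAP = {
--     "Chapter 1 — Introduction": [
--         "main.py", "app.py", "run.py", "config", "__init__"
--     ],
--     "Chapter 2 — Literature Review": [
--         "research", "literature", "review", "related", "survey"
--     ],
--     "Chapter 3 — System Requirements (SRS)": [
--         "requirements", "specs", "schema", "models", "database", "db"
--     ],
--     "Chapter 4 — System Design & Architecture": [
--         "agent", "supervisor", "router", "pipeline", "architecture",
--         "design", "workflow", "orchestrat"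
--     ],
--     "Chapter 5 — Implementation": [
--         "tools", "utils", "helper", "service", "handler", "processor",
--         "client", "api", "integrat", "prompt"
--     ],
--     "Chapter 6 — Testing & Evaluation": [
--         "test", "eval", "benchmark", "validate", "check", "assert"
--     ],
--     "Chapter 7 — Conclusion & Future Work": [
--         "readme", "changelog", "docs", "report", "conclusion"
--     ],
-- }
--
-- def map_files_to_chapters(changed_files: list[str]) -> dict[str, list[str]]:
--     """Return {chapter: [files]} for all changed files."""
--     result: dict[str, list[str]] = {}
--     for chapter, keywords in CHAPTER_MAP.items():
--         matched = [
--             f for f in changed_files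
--             if any(kw.lower() in f.lower() for kw in keywords)
--         ]
--         if matched:
--             result[chapter] = matched
--     # Files that didn't match any chapter → Implementation (catch-all)
--     matched_all = [f for files in result.values() for f in files]
--     unmatched = [f for f in changed_files if f not in matched_all]
--     if unmatched:
--         result.setdefault("Chapter 5 — Implementation", []).extend(unmatched)
--     return result
-- ===== SOURCE B (Python) =====
-- CHAPTER_MAP = {
--     "Chapter 1 — Introduction": [
--         "main.py", "app.py", "run.py", "config", "__init__"
--     ],
--     "Chapter 2 — Literature Review": [
--         "research", "literature", "review", "related", "survey"
--     ],
--     "Chapter 3 — System Requirements (SRS)": [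
--         "requirements", "specs", "schema", "models", "database", "db"
--     ],
--     "Chapter 4 — System Design & Architecture": [
--         "agent", "supervisor", "router", "pipeline", "architecture",
--         "design", "workflow", "orchestrat"
--     ],
--     "Chapter 5 — Implementation": [
--         "tools", "utils", "helper", "service", "handler", "processor",
--         "client", "api", "integrat", "prompt"
--     ],
--     "Chapter 6 — Testing & Evaluation": [
--         "test", "eval", "benchmark", "validate", "check", "assert"
--     ],
--     "Chapter 7 — Conclusion & Future Work": [
--         "readme", "changelog", "docs", "report", "conclusion"
--     ],
-- }
--
-- def map_files_to_chapters(changed_files: list[str]) -> dict[str, list[str]]: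
--     """Return {chapter: [files]} for all changed files."""
--     index = {chapter: [] for chapter in CHAPTER_MAP}
--     unmatched = []
--     for f in changed_files:
--         low = f.lower()
--         hit = False
--         for chapter, keywords in CHAPTER_MAP.items():
--             if any(kw.lower() in low for kw in keywords):
--                 index[chapter].append(f)
--                 hit = True
--         if not hit:
--             unmatched.append(f)
--     result = {chapter: files for chapter, files in index.items() if files}
--     if unmatched:
--         result.setdefault("Chapter 5 — Implementation", []).extend(unmatched)
--     return result
-- ===== Notes on version B (the rewrite author's own statement) =====
-- stated objective: faster
-- what changed: A rescans changed_files once per chapter and then rescans a flattened matched_all list for membership; B makes a single pass over changed_files, appending each file to every matching chapter's index list and collecting non-matching files into unmatched directly, then assembles the result from the index in CHAPTER_MAP order keeping non-empty lists.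
import Mathlib
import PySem

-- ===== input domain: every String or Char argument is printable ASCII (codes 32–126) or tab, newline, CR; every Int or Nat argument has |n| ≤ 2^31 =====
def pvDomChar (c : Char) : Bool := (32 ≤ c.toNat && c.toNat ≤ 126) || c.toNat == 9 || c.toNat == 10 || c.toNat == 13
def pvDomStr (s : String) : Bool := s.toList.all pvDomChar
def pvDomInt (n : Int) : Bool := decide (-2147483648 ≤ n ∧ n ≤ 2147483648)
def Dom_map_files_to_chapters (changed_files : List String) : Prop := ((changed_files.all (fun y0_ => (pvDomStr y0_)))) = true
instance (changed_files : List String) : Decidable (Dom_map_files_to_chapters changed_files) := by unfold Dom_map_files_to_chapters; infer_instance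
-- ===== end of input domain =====

-- B replaces A's seven per-chapter rescans of changed_files (plus a separate matched_all
-- membership scan) by one pass over the files that builds a per-chapter index and the
-- unmatched list together, avoiding A's quadratic 'f not in matched_all' list scan (objective: faster; measured).

-- module-level constant CHAPTER_MAP (insertion order preserved)
def chapterMap : List (String × List String) := [
  ("Chapter 1 — Introduction", ["main.py", "app.py", "run.py", "config", "__init__"]),
  ("Chapter 2 — Literature Review", ["research", "literature", "review", "related", "survey"]),
  ("Chapter 3 — System Requirements (SRS)", ["requirements", "specs", "schema", "models", "database", "db"]),
  ("Chapter 4 — System Design & Architecture", ["agent", "supervisor", "router", "pipeline", "architecture", "design", "workflow", "orchestrat"]),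
  ("Chapter 5 — Implementation", ["tools", "utils", "helper", "service", "handler", "processor", "client", "api", "integrat", "prompt"]),
  ("Chapter 6 — Testing & Evaluation", ["test", "eval", "benchmark", "validate", "check", "assert"]),
  ("Chapter 7 — Conclusion & Future Work", ["readme", "changelog", "docs", "report", "conclusion"])]

-- any(kw.lower() in low for kw in keywords)
def pvMatch (keywords : List String) (low : String) : Bool :=
  keywords.any (fun kw => PySem.Str.isIn (PySem.Str.lower kw) low)

-- ===== PORT A =====
def map_files_to_chapters (changed_files : List String) : List (String × List String) :=
  let result : PySem.Dict String (List String) :=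
    chapterMap.foldl (fun result p =>
      let matched := changed_files.filter (fun f => pvMatch p.2 (PySem.Str.lower f))
      if matched.isEmpty then result else result.insert p.1 matched)
      PySem.Dict.empty
  let matched_all := result.values.flatten
  let unmatched := changed_files.filter (fun f => !(matched_all.contains f))
  let result :=
    if unmatched.isEmpty then result
    -- result.setdefault("Chapter 5 — Implementation", []).extend(unmatched)
    else result.modify "Chapter 5 — Implementation" [] (fun v => v ++ unmatched)
  result.items

-- ===== PORT B =====
-- body of B's single file loop: append f to every matching chapter's list, or to unmatched
def pvStepB (st : List ((String × List String) × List String) × List String) (f : String) :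
    List ((String × List String) × List String) × List String :=
  let low := PySem.Str.lower f
  let idx := st.1.map (fun e => if pvMatch e.1.2 low then (e.1, e.2 ++ [f]) else e)
  let hit := chapterMap.any (fun p => pvMatch p.2 low)
  (idx, if hit then st.2 else st.2 ++ [f])

def map_files_to_chapters_alt (changed_files : List String) : List (String × List String) :=
  let st := changed_files.foldl pvStepB
    (chapterMap.map (fun p => (p, ([] : List String))), ([] : List String))
  let result := (st.1.filter (fun e => !e.2.isEmpty)).map (fun e => (e.1.1, e.2))
  if st.2.isEmpty then result
  else if result.any (fun e => e.1 == "Chapter 5 — Implementation") then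
    result.map (fun e => if e.1 == "Chapter 5 — Implementation" then (e.1, e.2 ++ st.2) else e)
  else result ++ [("Chapter 5 — Implementation", st.2)]

-- ===== PRECONDITION & SPEC =====
def Spec_map_files_to_chapters (changed_files : List String) (out : List (String × List String)) : Prop := out = map_files_to_chapters_alt changed_files
instance (changed_files : List String) (out : List (String × List String)) : Decidable (Spec_map_files_to_chapters changed_files out) := by unfold Spec_map_files_to_chapters; infer_instance

-- ===== CLAIM (what is proved, stated in full; the proofs are below) =====
def Claim_equal_map_files_to_chapters : Prop := ∀ (changed_files : List String), Dom_map_files_to_chapters changed_files → Spec_map_files_to_chapters changed_files (map_files_to_chapters changed_files)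

-- ===== LEMMAS AND PROOFS =====

-- the common "result before the catch-all": chapters with a non-empty matched list, in map order
def pvRes (cf : List String) : List (String × List String) :=
  chapterMap.filterMap (fun p =>
    let matched := cf.filter (fun f => pvMatch p.2 (PySem.Str.lower f))
    if matched.isEmpty then none else some (p.1, matched))

theorem foldB (cf : List String) : ∀ (idx : List ((String × List String) × List String)) (u : List String),
    cf.foldl pvStepB (idx, u) =
      (idx.map (fun e => (e.1, e.2 ++ cf.filter (fun f => pvMatch e.1.2 (PySem.Str.lower f)))),
       u ++ cf.filter (fun f => !chapterMap.any (fun p => pvMatch p.2 (PySem.Str.lower f)))) := by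
  induction cf with
  | nil => simp
  | cons f tl ih =>
    intro idx u
    rw [List.foldl_cons, pvStepB, ih]
    simp only [List.map_map, List.filter_cons]
    refine Prod.ext ?_ ?_ <;> simp only []
    · apply List.map_congr_left
      intro e _
      by_cases h : pvMatch e.1.2 (PySem.Str.lower f) <;> simp [h]
    · by_cases h : chapterMap.any (fun p => pvMatch p.2 (PySem.Str.lower f)) <;> simp [h]

theorem foldA (cf : List String) : ∀ (cm : List (String × List String)) (d : PySem.Dict String (List String)),
    (∀ p ∈ cm, d.contains p.1 = false) → (cm.map Prod.fst).Nodup →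
    (cm.foldl (fun result p =>
        let matched := cf.filter (fun f => pvMatch p.2 (PySem.Str.lower f))
        if matched.isEmpty then result else result.insert p.1 matched) d).items
    = d.items ++ cm.filterMap (fun p =>
        let matched := cf.filter (fun f => pvMatch p.2 (PySem.Str.lower f))
        if matched.isEmpty then none else some (p.1, matched)) := by
  intro cm
  induction cm with
  | nil => intro d _ _; simp
  | cons p rest ih =>
    intro d hd hnd
    simp only [List.foldl_cons, List.filterMap_cons]
    by_cases h : (cf.filter (fun f => pvMatch p.2 (PySem.Str.lower f))).isEmpty
    · simp only [h, if_pos]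
      rw [ih d (fun q hq => hd q (List.mem_cons_of_mem _ hq)) (by simpa using hnd.of_cons)]
    · simp only [h, if_neg, Bool.not_eq_true]
      have hins : (d.insert p.1 (cf.filter (fun f => pvMatch p.2 (PySem.Str.lower f)))).items
          = d.items ++ [(p.1, cf.filter (fun f => pvMatch p.2 (PySem.Str.lower f)))] := by
        simp [PySem.Dict.insert, hd p (List.mem_cons_self ..)]
      rw [ih _ ?_ (by simpa using hnd.of_cons)]
      · rw [hins]; simp
      · intro q hq
        simp only [PySem.Dict.contains, hins, List.any_append, List.any_cons, List.any_nil]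
        have h1 : d.contains q.1 = false := hd q (List.mem_cons_of_mem _ hq)
        have h2 : p.1 ≠ q.1 := by
          simp only [List.map_cons, List.nodup_cons] at hnd
          exact fun e => hnd.1 (e ▸ List.mem_map_of_mem hq)
        simp only [PySem.Dict.contains] at h1
        simp [h1, beq_eq_false_iff_ne.mpr h2]

theorem assembleB (l : List (String × List String)) (g : String × List String → List String) :
    ((l.map (fun p => (p, g p))).filter (fun e => !e.2.isEmpty)).map (fun e => (e.1.1, e.2))
    = l.filterMap (fun p => if (g p).isEmpty then none else some (p.1, g p)) := by
  induction l with
  | nil => simp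
  | cons p t ih =>
    simp only [List.map_cons, List.filter_cons, List.filterMap_cons]
    by_cases h : (g p).isEmpty <;> simp [h, ih]

theorem keysSub (l : List (String × List String)) (g : String × List String → List String) :
    ((l.filterMap (fun p => if (g p).isEmpty then none else some (p.1, g p))).map Prod.fst).Sublist
      (l.map Prod.fst) := by
  induction l with
  | nil => simp
  | cons p t ih =>
    simp only [List.filterMap_cons, List.map_cons]
    by_cases h : (g p).isEmpty
    · simp only [h, if_pos]; exact ih.cons _
    · simp only [h, if_neg, Bool.not_eq_true, List.map_cons]; exact ih.cons₂ _

theorem matchedAll (cf : List String) (f : String) (hf : f ∈ cf) :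
    (((pvRes cf).map Prod.snd).flatten.contains f) = chapterMap.any (fun p => pvMatch p.2 (PySem.Str.lower f)) := by
  rw [Bool.eq_iff_iff]
  simp only [List.contains_iff_mem, List.mem_flatten, List.mem_map, List.mem_filterMap, pvRes,
    List.any_eq_true]
  constructor
  · rintro ⟨l, ⟨⟨q, ⟨p, hp, hsome⟩, rfl⟩, hfl⟩⟩
    by_cases h : (cf.filter (fun f => pvMatch p.2 (PySem.Str.lower f))).isEmpty
    · simp [h] at hsome
    · simp only [h, if_neg, Bool.not_eq_true] at hsome
      cases hsome
      exact ⟨p, hp, (List.mem_filter.mp hfl).2⟩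
  · rintro ⟨p, hp, hm⟩
    refine ⟨cf.filter (fun f => pvMatch p.2 (PySem.Str.lower f)), ⟨⟨(p.1, cf.filter (fun f => pvMatch p.2 (PySem.Str.lower f))), ⟨p, hp, ?_⟩, rfl⟩, List.mem_filter.mpr ⟨hf, hm⟩⟩⟩
    have : ¬ (cf.filter (fun f => pvMatch p.2 (PySem.Str.lower f))).isEmpty := by
      simp only [List.isEmpty_iff, List.filter_eq_nil_iff]
      intro h; exact absurd hm (by simpa using h f hf)
    simp [this]

theorem modify_mk (l : List (String × List String)) (k : String) (dflt : List String)
    (g : List String → List String) (h : (l.map Prod.fst).Nodup) :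
    ((PySem.Dict.mk l).modify k dflt g).items =
      if l.any (fun e => e.1 == k) then l.map (fun e => if e.1 == k then (e.1, g e.2) else e)
      else l ++ [(k, g dflt)] := by
  induction l with
  | nil => simp [PySem.Dict.modify, PySem.Dict.insert, PySem.Dict.contains, PySem.Dict.getD, PySem.Dict.get?]
  | cons e t ih =>
    simp only [List.map_cons, List.nodup_cons] at h
    by_cases he : e.1 == k
    · have hek : e.1 = k := beq_iff_eq.mp he
      have hkt : ∀ q ∈ t, (q.1 == k) = false := by
        intro q hq
        refine beq_eq_false_iff_ne.mpr fun hqk => h.1 ?_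
        exact hek ▸ hqk ▸ List.mem_map_of_mem hq
      have hany : (e :: t).any (fun e => e.1 == k) = true := by simp [he]
      rw [if_pos hany]
      simp only [PySem.Dict.modify, PySem.Dict.insert, PySem.Dict.contains, PySem.Dict.getD,
        PySem.Dict.get?, List.any_cons, he, Bool.true_or, if_pos, List.map_cons]
      rw [List.find?_cons_of_pos (by simpa using he)]
      simp only [Option.map_some, Option.getD_some]
      refine congrArg₂ _ (by rw [hek]) (List.map_congr_left fun q hq => ?_)
      simp [hkt q hq]
    · have hstep : ((PySem.Dict.mk (e :: t)).modify k dflt g).items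
          = e :: ((PySem.Dict.mk t).modify k dflt g).items := by
        simp only [PySem.Dict.modify, PySem.Dict.insert, PySem.Dict.contains, PySem.Dict.getD,
          PySem.Dict.get?, List.any_cons, he, Bool.false_or]
        rw [List.find?_cons_of_neg (by simpa using he)]
        by_cases ht : t.any (fun p => p.1 == k) <;>
          simp only [ht, he, if_pos, if_neg, Bool.false_eq_true, not_false_eq_true,
            List.map_cons, List.cons_append, beq_iff_eq, if_true] <;>
          all_goals rw [if_neg (fun hk : e.1 = k => absurd (beq_iff_eq.mpr hk) he)]
      rw [hstep, ih h.2]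
      by_cases ht : t.any (fun p => p.1 == k) <;>
        simp only [List.any_cons, he, Bool.false_or, ht, if_pos, if_neg, Bool.false_eq_true,
          not_false_eq_true, List.map_cons, List.cons_append, beq_iff_eq, if_true] <;>
        all_goals rw [if_neg (fun hk : e.1 = k => absurd (beq_iff_eq.mpr hk) he)]
theorem A_char (cf : List String) : map_files_to_chapters cf =
    (let u := cf.filter (fun f => !((((pvRes cf).map Prod.snd).flatten).contains f))
     if u.isEmpty then pvRes cf
     else if (pvRes cf).any (fun e => e.1 == "Chapter 5 — Implementation") then
       (pvRes cf).map (fun e => if e.1 == "Chapter 5 — Implementation" then (e.1, e.2 ++ u) else e)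
     else pvRes cf ++ [("Chapter 5 — Implementation", u)]) := by
  have hnd : ((pvRes cf).map Prod.fst).Nodup := by
    refine (keysSub chapterMap _).nodup ?_
    decide
  have hd : (chapterMap.foldl (fun result p =>
        let matched := cf.filter (fun f => pvMatch p.2 (PySem.Str.lower f))
        if matched.isEmpty then result else result.insert p.1 matched) PySem.Dict.empty)
      = PySem.Dict.mk (pvRes cf) := by
    apply PySem.Dict.ext
    rw [foldA cf chapterMap PySem.Dict.empty (fun p _ => rfl) (by decide)]
    rfl
  simp only [map_files_to_chapters, hd]
  by_cases hu : (cf.filter (fun f => !(((PySem.Dict.mk (pvRes cf)).values.flatten).contains f))).isEmpty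
  · simp only [hu, if_pos, PySem.Dict.values, PySem.Dict.items] at *
  · simp only [PySem.Dict.values, PySem.Dict.items] at hu ⊢
    simp only [hu, if_neg, Bool.not_eq_true, if_false]
    rw [modify_mk _ _ _ _ hnd]
    simp

theorem B_char (cf : List String) : map_files_to_chapters_alt cf =
    (let u := cf.filter (fun f => !chapterMap.any (fun p => pvMatch p.2 (PySem.Str.lower f)))
     if u.isEmpty then pvRes cf
     else if (pvRes cf).any (fun e => e.1 == "Chapter 5 — Implementation") then
       (pvRes cf).map (fun e => if e.1 == "Chapter 5 — Implementation" then (e.1, e.2 ++ u) else e)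
     else pvRes cf ++ [("Chapter 5 — Implementation", u)]) := by
  simp only [map_files_to_chapters_alt, foldB, List.nil_append]
  have hmm : (chapterMap.map (fun p => (p, ([] : List String)))).map
        (fun e => (e.1, e.2 ++ cf.filter (fun f => pvMatch e.1.2 (PySem.Str.lower f))))
      = chapterMap.map (fun p => (p, cf.filter (fun f => pvMatch p.2 (PySem.Str.lower f)))) := by
    rw [List.map_map]; rfl
  rw [hmm, assembleB chapterMap (fun p => cf.filter (fun f => pvMatch p.2 (PySem.Str.lower f)))]
  rfl

-- ===== VERDICT (by name: the statement is the Claim_ definition above) =====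
theorem map_files_to_chapters_spec : Claim_equal_map_files_to_chapters := by
  intro cf _
  unfold Spec_map_files_to_chapters
  rw [A_char, B_char]
  have hu : cf.filter (fun f => !((((pvRes cf).map Prod.snd).flatten).contains f))
      = cf.filter (fun f => !chapterMap.any (fun p => pvMatch p.2 (PySem.Str.lower f))) :=
    List.filter_congr (fun f hf => by rw [matchedAll cf f hf])
  simp only [hu]
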